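-- pv_equiv track=rewrite | github.com/Shamrock13/flintlock | src/cashel/fortinet.py | _expand_service
-- ===== SOURCE A (Python) =====
-- _BROAD_VALUES = {"all", "any", "*"}
--
-- def _dedupe_stable(values):
--     seen = set()
--     result = []
--     for value in values:
--         if value not in seen:
--             result.append(value)
--             seen.add(value)
--     return result
--
-- def _normalize_broad(value):
--     if str(value).lower() in _BROAD_VALUES:
--         return "ALL"
--     return value
--
-- def _expand_service(name, services, service_groups, seen) -> list[str]:
--     normalized = _normalize_broad(name)
--     if normalized == "ALL":
--         return ["ALL"]
--     if name in seen:
--         return [name]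
--     if name in service_groups:
--         seen.add(name)
--         values = []
--         for member in service_groups[name].get("member", []):
--             values.extend(
--                 _expand_service(member, services, service_groups, seen.copy())
--             )
--         return _dedupe_stable(values)
--     if name in services:
--         service = services[name]
--         values = []
--         if service.get("tcp-portrange"):
--             values.append(f"tcp/{service['tcp-portrange']}")
--         if service.get("udp-portrange"):
--             values.append(f"udp/{service['udp-portrange']}")
--         if not values and service.get("protocol"):
--             values.append(f"protocol/{service['protocol']}")
--         return values or [name]
--     return [normalized]
-- ===== SOURCE B (Python) =====
-- # B: iterative explicit-stack DFS emitting raw tokens, with ONE global stable dedupe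
-- # at the end (A dedupes per group level).  Return-value equivalence only: A mutates
-- # the caller's `seen` set (seen.add(name) in the group branch); B leaves it untouched.
-- _BROAD = {"all", "any", "*"}
--
--
-- def _service_tokens(service, name):
--     tokens = []
--     tcp = service.get("tcp-portrange")
--     if tcp:
--         tokens.append("tcp/%s" % tcp)
--     udp = service.get("udp-portrange")
--     if udp:
--         tokens.append("udp/%s" % udp)
--     if not tokens and service.get("protocol"):
--         tokens.append("protocol/%s" % service["protocol"])
--     return tokens or [name]
--
--
-- def _expand_service(name, services, service_groups, seen):
--     out = []
--     stack = [(name, frozenset(seen))]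
--     while stack:
--         n, s = stack.pop()
--         if str(n).lower() in _BROAD:
--             out.append("ALL")
--         elif n in s:
--             out.append(n)
--         elif n in service_groups:
--             child = s | {n}
--             for member in reversed(service_groups[n].get("member", [])):
--                 stack.append((member, child))
--         elif n in services:
--             out.extend(_service_tokens(services[n], n))
--         else:
--             out.append(n)
--     result = []
--     emitted = set()
--     for value in out:
--         if value not in emitted:
--             result.append(value)
--             emitted.add(value)
--     return result
-- ===== Notes on version B (the rewrite author's own statement) =====
-- stated objective: alternative
-- what changed: Replaced A's recursion with per-group-level stable dedupe by an explicit-stack iterative DFS that emits raw tokens and deduplicates once globally at the end (proved: one terminal stable dedupe equals A's nested per-level dedupes); B also does not mutate the caller's seen set.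
import Mathlib
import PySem

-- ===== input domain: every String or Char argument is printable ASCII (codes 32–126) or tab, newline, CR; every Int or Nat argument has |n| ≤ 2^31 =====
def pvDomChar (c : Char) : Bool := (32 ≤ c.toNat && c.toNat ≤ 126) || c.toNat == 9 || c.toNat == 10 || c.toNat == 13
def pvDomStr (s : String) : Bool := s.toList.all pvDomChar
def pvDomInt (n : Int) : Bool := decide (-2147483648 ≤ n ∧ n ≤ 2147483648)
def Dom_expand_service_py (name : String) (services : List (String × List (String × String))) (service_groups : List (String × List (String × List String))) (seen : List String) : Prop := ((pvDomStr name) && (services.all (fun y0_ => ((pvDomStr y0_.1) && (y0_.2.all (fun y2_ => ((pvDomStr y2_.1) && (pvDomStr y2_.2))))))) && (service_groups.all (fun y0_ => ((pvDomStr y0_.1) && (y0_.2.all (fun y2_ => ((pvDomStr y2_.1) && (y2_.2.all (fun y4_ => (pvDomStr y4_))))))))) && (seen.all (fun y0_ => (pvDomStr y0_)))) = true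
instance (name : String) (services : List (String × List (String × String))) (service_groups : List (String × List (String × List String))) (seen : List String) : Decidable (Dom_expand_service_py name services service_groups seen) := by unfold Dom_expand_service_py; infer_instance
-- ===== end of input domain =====

-- B replaces A's recursion-with-per-level-dedupe by an explicit-stack DFS that emits
-- raw tokens and deduplicates once at the end (objective: alternative decomposition).
-- Return-value equivalence only: Python A mutates the caller's `seen` set, B does not.

-- ===== PORT A =====
def pvBroad : List String := ["all", "any", "*"]

-- _normalize_broad
def pvNormalize (v : String) : String :=
  if (PySem.Str.lower v) ∈ pvBroad then "ALL" else v

-- _dedupe_stable (loop over values with an emitted-set and a result accumulator)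
def pvDedupe (emitted : PySem.Set String) (result : List String) : List String → List String
  | [] => result
  | v :: vs =>
    if emitted.contains v then pvDedupe emitted result vs
    else pvDedupe (PySem.Set.add emitted v) (result ++ [v]) vs

-- termination measure: number of group keys not yet in `seen`
def pvMu (sgs : List (String × List (String × List String))) (s : List String) : Nat :=
  ((sgs.map Prod.fst).filter (fun k => !s.contains k)).length

theorem pvGet?_mem_pair {ν : Type} (l : List (String × ν)) (k : String) (v : ν)
    (h : (PySem.Dict.mk l).get? k = some v) : (k, v) ∈ l := by
  induction l with
  | nil => simp [PySem.Dict.get?] at h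
  | cons p rest ih =>
    rw [PySem.Dict.get?_mk_cons] at h
    by_cases hk : p.1 == k
    · simp [hk] at h
      have h1 : p.1 = k := beq_iff_eq.mp hk
      obtain ⟨a, b⟩ := p
      simp at h1 h
      subst h1; subst h
      exact List.mem_cons_self ..
    · simp [hk] at h
      exact List.mem_cons.mpr (Or.inr (ih h))

theorem pvFilter_le {α : Type} (p q : α → Bool) (h : ∀ x, q x = true → p x = true)
    (xs : List α) : (xs.filter q).length ≤ (xs.filter p).length := by
  induction xs with
  | nil => simp
  | cons a t ih =>
    by_cases hq : q a = true
    · have hp := h a hq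
      simp [List.filter, hq, hp]; omega
    · simp only [Bool.not_eq_true] at hq
      by_cases hp : p a = true <;> simp [List.filter, hq, hp] <;> omega

theorem pvFilter_lt {α : Type} (p q : α → Bool) (h : ∀ x, q x = true → p x = true)
    (a : α) (xs : List α) (ha : a ∈ xs) (hpa : p a = true) (hqa : q a = false) :
    (xs.filter q).length < (xs.filter p).length := by
  induction xs with
  | nil => simp at ha
  | cons b t ih =>
    rcases List.mem_cons.mp ha with hb | hb
    · subst hb
      simp [List.filter, hpa, hqa]
      exact pvFilter_le p q h t
    · by_cases hq : q b = true
      · have hp := h b hq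
        simp [List.filter, hq, hp]
        exact ih hb
      · simp only [Bool.not_eq_true] at hq
        by_cases hp : p b = true <;> simp [List.filter, hq, hp]
        · exact Nat.le_of_lt (ih hb)
        · exact ih hb

theorem pvContains_append_singleton (s : List String) (x y : String) :
    (s ++ [x]).contains y = (s.contains y || y == x) := by
  simp only [List.contains_append, List.contains_cons, List.contains_nil, Bool.or_false]

theorem pvMu_lt (sgs : List (String × List (String × List String))) (s : List String)
    (name : String) (hmem : name ∈ sgs.map Prod.fst) (hns : s.contains name = false) :
    pvMu sgs (PySem.Set.add s name) < pvMu sgs s := by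
  unfold pvMu
  have hadd : PySem.Set.add s name = s ++ [name] := by
    apply PySem.Set.add_of_not_mem
    simpa using hns
  rw [hadd]
  apply pvFilter_lt (fun k => !s.contains k) (fun k => !(s ++ [name]).contains k)
  · intro x hx
    simp only [pvContains_append_singleton, Bool.not_eq_true'] at hx ⊢
    rcases Bool.or_eq_false_iff.mp hx with ⟨h1, _⟩
    exact h1
  · exact hmem
  · simpa using hns
  · simp [pvContains_append_singleton]

-- _expand_service (A): recursion with per-group-level dedupe
def expand_service_py (name : String) (services : List (String × List (String × String))) (service_groups : List (String × List (String × List String))) (seen : List String) : List String :=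
  let normalized := pvNormalize name
  if normalized = "ALL" then ["ALL"]
  else if hseen : seen.contains name then [name]
  else
    match hg : (PySem.Dict.mk service_groups).get? name with
    | some group =>
      let seen' := PySem.Set.add seen name
      pvDedupe [] []
        (((PySem.Dict.mk group).getD "member" []).foldl
          (fun vs m => vs ++ expand_service_py m services service_groups seen') [])
    | none =>
      match (PySem.Dict.mk services).get? name with
      | some service =>
        let values : List String := []
        let values :=
          match (PySem.Dict.mk service).get? "tcp-portrange" with
          | some t => if t ≠ "" then values ++ ["tcp/" ++ t] else values
          | none => values
        let values :=
          match (PySem.Dict.mk service).get? "udp-portrange" with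
          | some u => if u ≠ "" then values ++ ["udp/" ++ u] else values
          | none => values
        let values :=
          if values = [] then
            match (PySem.Dict.mk service).get? "protocol" with
            | some p => if p ≠ "" then values ++ ["protocol/" ++ p] else values
            | none => values
          else values
        if values = [] then [name] else values
      | none => [normalized]
termination_by pvMu service_groups seen
decreasing_by
  exact pvMu_lt service_groups seen name
    (by simpa using List.mem_map_of_mem (f := Prod.fst) (pvGet?_mem_pair _ _ _ hg))
    (by simpa using hseen)

-- ===== PORT B =====
-- _service_tokens
def pvServiceTokens (service : List (String × String)) (name : String) : List String :=
  let tokens : List String := []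
  let tokens :=
    match (PySem.Dict.mk service).get? "tcp-portrange" with
    | some t => if t ≠ "" then tokens ++ ["tcp/" ++ t] else tokens
    | none => tokens
  let tokens :=
    match (PySem.Dict.mk service).get? "udp-portrange" with
    | some u => if u ≠ "" then tokens ++ ["udp/" ++ u] else tokens
    | none => tokens
  let tokens :=
    if tokens = [] then
      match (PySem.Dict.mk service).get? "protocol" with
      | some p => if p ≠ "" then tokens ++ ["protocol/" ++ p] else tokens
      | none => tokens
    else tokens
  if tokens = [] then [name] else tokens

-- bound on the member-list length of any group (for the stack termination measure)
def pvL (sgs : List (String × List (String × List String))) : Nat :=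
  (sgs.map (fun g => ((PySem.Dict.mk g.2).getD "member" []).length)).foldr max 0

-- stack measure
def pvStackM (sgs : List (String × List (String × List String)))
    (st : List (String × List String)) : Nat :=
  (st.map (fun e => (pvL sgs + 1) ^ (pvMu sgs e.2 + 1))).sum

theorem pvLe_foldr_max (x : Nat) (xs : List Nat) (h : x ∈ xs) : x ≤ xs.foldr max 0 := by
  induction xs with
  | nil => simp at h
  | cons a t ih =>
    rcases List.mem_cons.mp h with rfl | h
    · exact Nat.le_max_left _ _
    · exact Nat.le_trans (ih h) (Nat.le_max_right _ _)

theorem pvStackM_cons (sgs : List (String × List (String × List String)))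
    (e : String × List String) (st : List (String × List String)) :
    pvStackM sgs (e :: st) = (pvL sgs + 1) ^ (pvMu sgs e.2 + 1) + pvStackM sgs st := by
  simp [pvStackM]

theorem pvStackM_pop (sgs : List (String × List (String × List String)))
    (e : String × List String) (st : List (String × List String)) :
    pvStackM sgs st < pvStackM sgs (e :: st) := by
  rw [pvStackM_cons]
  have : 0 < (pvL sgs + 1) ^ (pvMu sgs e.2 + 1) := Nat.pow_pos (Nat.succ_pos _)
  omega

theorem pvSum_const {α : Type} (l : List α) (c : Nat) :
    (l.map (fun _ => c)).sum = l.length * c := by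
  induction l with
  | nil => simp
  | cons a t ih => simp [List.map, ih]; ring

theorem pvStackM_push (sgs : List (String × List (String × List String)))
    (n : String) (s : List String) (group : List (String × List String))
    (st : List (String × List String))
    (hg : (PySem.Dict.mk sgs).get? n = some group)
    (hns : s.contains n = false) :
    pvStackM sgs ((((PySem.Dict.mk group).getD "member" []).map
        (fun m => (m, PySem.Set.add s n))) ++ st) < pvStackM sgs ((n, s) :: st) := by
  have hpair := pvGet?_mem_pair _ _ _ hg
  have hmem : n ∈ sgs.map Prod.fst := by
    simpa using List.mem_map_of_mem (f := Prod.fst) hpair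
  have hmu : pvMu sgs (PySem.Set.add s n) < pvMu sgs s := pvMu_lt sgs s n hmem hns
  have hlen : ((PySem.Dict.mk group).getD "member" []).length ≤ pvL sgs := by
    apply pvLe_foldr_max
    exact List.mem_map_of_mem (f := fun g => ((PySem.Dict.mk g.2).getD "member" []).length) hpair
  have hconst : ((((PySem.Dict.mk group).getD "member" []).map
      ((fun e => (pvL sgs + 1) ^ (pvMu sgs e.2 + 1)) ∘ (fun m => (m, PySem.Set.add s n))))).sum
      = ((PySem.Dict.mk group).getD "member" []).length * (pvL sgs + 1) ^ (pvMu sgs (PySem.Set.add s n) + 1) := by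
    simp only [Function.comp_def]
    exact pvSum_const _ _
  have h1 : ((PySem.Dict.mk group).getD "member" []).length * (pvL sgs + 1) ^ (pvMu sgs (PySem.Set.add s n) + 1)
      < (pvL sgs + 1) ^ (pvMu sgs s + 1) := by
    calc ((PySem.Dict.mk group).getD "member" []).length * (pvL sgs + 1) ^ (pvMu sgs (PySem.Set.add s n) + 1)
        ≤ pvL sgs * (pvL sgs + 1) ^ (pvMu sgs (PySem.Set.add s n) + 1) :=
          Nat.mul_le_mul_right _ hlen
      _ ≤ pvL sgs * (pvL sgs + 1) ^ (pvMu sgs s) :=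
          Nat.mul_le_mul_left _ (Nat.pow_le_pow_right (Nat.succ_pos _) (by omega))
      _ < (pvL sgs + 1) * (pvL sgs + 1) ^ (pvMu sgs s) :=
          (Nat.mul_lt_mul_right (Nat.pow_pos (Nat.succ_pos _))).mpr (Nat.lt_succ_self _)
      _ = (pvL sgs + 1) ^ (pvMu sgs s + 1) := by ring
  unfold pvStackM
  rw [List.map_append, List.sum_append, List.map_map, hconst, List.map_cons, List.sum_cons]
  exact Nat.add_lt_add_right h1 _

-- the explicit-stack loop of B: pops the head, pushes group members (in member order)
def pvLoop (services : List (String × List (String × String)))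
    (sgs : List (String × List (String × List String))) :
    List (String × List String) → List String → List String
  | [], out => out
  | (n, s) :: st, out =>
    if (PySem.Str.lower n) ∈ pvBroad then pvLoop services sgs st (out ++ ["ALL"])
    else if hs : s.contains n then pvLoop services sgs st (out ++ [n])
    else
      match hg : (PySem.Dict.mk sgs).get? n with
      | some group =>
        pvLoop services sgs
          ((((PySem.Dict.mk group).getD "member" []).map (fun m => (m, PySem.Set.add s n))) ++ st) out
      | none =>
        match (PySem.Dict.mk services).get? n with
        | some service => pvLoop services sgs st (out ++ pvServiceTokens service n)
        | none => pvLoop services sgs st (out ++ [n])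
termination_by st _ => pvStackM sgs st
decreasing_by
  · exact pvStackM_pop sgs _ st
  · exact pvStackM_pop sgs _ st
  · exact pvStackM_push sgs n s group st hg (by simpa using hs)
  · exact pvStackM_pop sgs _ st
  · exact pvStackM_pop sgs _ st

-- _expand_service (B): seed the stack, run the loop, dedupe once at the end
-- (frozenset(seen) is a value copy: a no-op under Lean's value semantics)
def expand_service_py_alt (name : String) (services : List (String × List (String × String))) (service_groups : List (String × List (String × List String))) (seen : List String) : List String :=
  pvDedupe [] [] (pvLoop services service_groups [(name, seen)] [])

-- ===== PRECONDITION & SPEC =====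
def Spec_expand_service_py (name : String) (services : List (String × List (String × String))) (service_groups : List (String × List (String × List String))) (seen : List String) (out : List String) : Prop := out = expand_service_py_alt name services service_groups seen
instance (name : String) (services : List (String × List (String × String))) (service_groups : List (String × List (String × List String))) (seen : List String) (out : List String) : Decidable (Spec_expand_service_py name services service_groups seen out) := by unfold Spec_expand_service_py; infer_instance

-- ===== CLAIM (what is proved, stated in full; the proofs are below) =====
def Claim_equal_expand_service_py : Prop := ∀ (name : String) (services : List (String × List (String × String))) (service_groups : List (String × List (String × List String))) (seen : List String), Dom_expand_service_py name services service_groups seen → Spec_expand_service_py name services service_groups seen (expand_service_py name services service_groups seen)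

-- ===== LEMMAS AND PROOFS =====

-- the raw (un-deduped) token stream of one name: the common ground between A and B
def pvRaw (services : List (String × List (String × String)))
    (sgs : List (String × List (String × List String)))
    (n : String) (s : List String) : List String :=
  if (PySem.Str.lower n) ∈ pvBroad then ["ALL"]
  else if hs : s.contains n then [n]
  else
    match hg : (PySem.Dict.mk sgs).get? n with
    | some group =>
      ((PySem.Dict.mk group).getD "member" []).flatMap
        (fun m => pvRaw services sgs m (PySem.Set.add s n))
    | none =>
      match (PySem.Dict.mk services).get? n with
      | some service => pvServiceTokens service n
      | none => [n]
termination_by pvMu sgs s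
decreasing_by
  exact pvMu_lt sgs s n
    (by simpa using List.mem_map_of_mem (f := Prod.fst) (pvGet?_mem_pair _ _ _ hg))
    (by simpa using hs)

-- final emitted-set of a dedupe pass (proof device for pvDedupe over an append)
def pvDdSet (s : PySem.Set String) : List String → PySem.Set String
  | [] => s
  | v :: vs => if s.contains v then pvDdSet s vs else pvDdSet (PySem.Set.add s v) vs

theorem pvDedupe_acc (l : List String) : ∀ (s : PySem.Set String) (r : List String),
    pvDedupe s r l = r ++ pvDedupe s [] l := by
  induction l with
  | nil => intro s r; simp [pvDedupe]
  | cons v vs ih =>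
    intro s r
    by_cases h : s.contains v
    · simp only [pvDedupe, h, if_true]
      exact ih s r
    · simp only [pvDedupe, h, Bool.false_eq_true, if_false]
      rw [ih _ (r ++ [v]), ih _ ([] ++ [v])]
      simp

theorem pvDedupe_append (a : List String) : ∀ (b : List String) (s : PySem.Set String) (r : List String),
    pvDedupe s r (a ++ b) = pvDedupe (pvDdSet s a) (pvDedupe s r a) b := by
  induction a with
  | nil => intro b s r; simp [pvDdSet, pvDedupe]
  | cons v vs ih =>
    intro b s r
    by_cases h : s.contains v <;>
      simp only [List.cons_append, pvDedupe, pvDdSet, h, Bool.false_eq_true, if_false, if_true] <;>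
      apply ih

theorem pvContains_add (s : PySem.Set String) (x y : String) :
    (PySem.Set.add s x).contains y = (s.contains y || y == x) := by
  by_cases hx : x ∈ s
  · rw [PySem.Set.add_of_mem hx]
    by_cases hyx : y == x
    · have : y = x := beq_iff_eq.mp hyx
      subst this
      simp [List.contains_iff_mem, hx]
    · simp [hyx]
  · rw [PySem.Set.add_of_not_mem hx]
    exact pvContains_append_singleton s x y

-- a stable dedupe absorbs an already-deduped leading block (t's members already count as emitted in s)
theorem pvDedupe_absorb (l : List String) : ∀ (t s : PySem.Set String) (r z : List String),
    (∀ x, t.contains x = true → s.contains x = true) →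
    pvDedupe s r (pvDedupe t [] l ++ z) = pvDedupe s r (l ++ z) := by
  induction l with
  | nil => intro t s r z hsub; simp [pvDedupe]
  | cons v vs ih =>
    intro t s r z hsub
    by_cases ht : t.contains v
    · have hs : s.contains v = true := hsub v ht
      simp only [pvDedupe, ht, if_true, List.cons_append, hs]
      exact ih t s r z hsub
    · simp only [pvDedupe, ht, Bool.false_eq_true, if_false]
      rw [pvDedupe_acc vs (PySem.Set.add t v)]
      by_cases hs : s.contains v
      · simp only [List.append_assoc, List.cons_append, List.nil_append, pvDedupe, hs, if_true]
        apply ih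
        intro x hxt
        rw [pvContains_add] at hxt
        rcases Bool.or_eq_true_iff.mp hxt with h | h
        · exact hsub x h
        · have : x = v := beq_iff_eq.mp h
          subst this; exact hs
      · simp only [List.append_assoc, List.cons_append, List.nil_append, pvDedupe, hs,
          Bool.false_eq_true, if_false]
        apply ih
        intro x hxt
        rw [pvContains_add] at hxt
        rw [pvContains_add]
        rcases Bool.or_eq_true_iff.mp hxt with h | h
        · exact Bool.or_eq_true_iff.mpr (Or.inl (hsub x h))
        · exact Bool.or_eq_true_iff.mpr (Or.inr h)

-- one global dedupe collapses per-chunk dedupes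
theorem pvDedupe_flatMap {α : Type} (f : α → List String) (ms : List α) :
    ∀ (s : PySem.Set String) (r : List String),
    pvDedupe s r (ms.flatMap (fun m => pvDedupe [] [] (f m))) = pvDedupe s r (ms.flatMap f) := by
  induction ms with
  | nil => intro s r; simp
  | cons m ms ih =>
    intro s r
    rw [List.flatMap_cons, List.flatMap_cons]
    rw [pvDedupe_absorb (f m) [] s r _ (by intro x hx; simp at hx)]
    rw [pvDedupe_append (f m), pvDedupe_append (f m)]
    exact ih _ _

theorem pvNormalize_ne (v : String) (hb : ¬ (PySem.Str.lower v) ∈ pvBroad) :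
    pvNormalize v = v ∧ v ≠ "ALL" := by
  constructor
  · simp [pvNormalize, hb]
  · intro h; subst h
    exact hb (by decide)

theorem pvDedupe_single (x : String) : pvDedupe [] [] [x] = [x] := by
  simp [pvDedupe]

theorem pvDedupe_pair (x y : String) (h : x ≠ y) : pvDedupe [] [] [x, y] = [x, y] := by
  have hadd : PySem.Set.add ([] : PySem.Set String) x = [x] := rfl
  simp only [pvDedupe, hadd, List.contains_cons, List.contains_nil, List.elem_nil,
    Bool.or_false, Bool.false_eq_true, if_false]
  have hyx : (y == x) = false := beq_eq_false_iff_ne.mpr (Ne.symm h)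
  simp [hyx, pvDedupe]
  exact fun hq => h hq.symm

theorem pvTcp_ne_udp (t u : String) : ("tcp/" ++ t) ≠ ("udp/" ++ u) := by
  intro h
  have := congrArg String.toList h
  simp only [String.toList_append] at this
  have h4 : "tcp/".toList = ['t', 'c', 'p', '/'] := by decide
  have h5 : "udp/".toList = ['u', 'd', 'p', '/'] := by decide
  rw [h4, h5] at this
  simp at this

theorem pvDedupe_tokens (service : List (String × String)) (n : String) :
    pvDedupe [] [] (pvServiceTokens service n) = pvServiceTokens service n := by
  unfold pvServiceTokens
  rcases h1 : (PySem.Dict.mk service).get? "tcp-portrange" with _ | t <;>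
  rcases h2 : (PySem.Dict.mk service).get? "udp-portrange" with _ | u <;>
  rcases h3 : (PySem.Dict.mk service).get? "protocol" with _ | p <;>
  simp only [List.nil_append] <;> split_ifs <;>
  first
    | exact pvDedupe_single _
    | exact pvDedupe_pair _ _ (pvTcp_ne_udp t u)
    | simp_all

-- A computes dedupe-of-raw
theorem pvA_eq (services : List (String × List (String × String)))
    (sgs : List (String × List (String × List String))) :
    ∀ (fuel : Nat) (s : List String), pvMu sgs s < fuel → ∀ (n : String),
    expand_service_py n services sgs s = pvDedupe [] [] (pvRaw services sgs n s) := by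
  intro fuel
  induction fuel with
  | zero => intro s h n; exact absurd h (Nat.not_lt_zero _)
  | succ f ih =>
    intro s hmu n
    rw [expand_service_py, pvRaw]
    by_cases hb : (PySem.Str.lower n) ∈ pvBroad
    · have hnorm : pvNormalize n = "ALL" := by simp [pvNormalize, hb]
      simp only [hnorm, hb, if_true, if_pos]
      exact (pvDedupe_single "ALL").symm
    · obtain ⟨hnorm, hne⟩ := pvNormalize_ne n hb
      have hcond : ¬ (pvNormalize n = "ALL") := by rw [hnorm]; exact hne
      simp only [hb, if_false, hcond, if_neg, not_false_iff]
      by_cases hs : s.contains n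
      · simp only [hs, dif_pos]
        exact (pvDedupe_single n).symm
      · simp only [hs, Bool.false_eq_true, dif_neg, not_false_iff]
        cases hg : (PySem.Dict.mk sgs).get? n with
        | some group =>
          simp only [hg]
          rw [PySem.List.foldl_append_eq_flatMap]
          simp only [List.nil_append]
          have hmem : n ∈ sgs.map Prod.fst := by
            simpa using List.mem_map_of_mem (f := Prod.fst) (pvGet?_mem_pair _ _ _ hg)
          have hmu' : pvMu sgs (PySem.Set.add s n) < f := by
            have := pvMu_lt sgs s n hmem (by simpa using hs)
            omega
          have hrec : ∀ m, expand_service_py m services sgs (PySem.Set.add s n)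
              = pvDedupe [] [] (pvRaw services sgs m (PySem.Set.add s n)) :=
            fun m => ih (PySem.Set.add s n) hmu' m
          simp only [hrec]
          exact pvDedupe_flatMap _ _ [] []
        | none =>
          simp only [hg]
          cases hsv : (PySem.Dict.mk services).get? n with
          | some service =>
            simp only [hsv]
            exact (pvDedupe_tokens service n).symm
          | none =>
            simp only [hsv, hnorm]
            exact (pvDedupe_single n).symm

-- the stack loop emits the concatenation of the raw streams of its entries
theorem pvLoop_eq (services : List (String × List (String × String)))
    (sgs : List (String × List (String × List String))) :
    ∀ (fuel : Nat) (st : List (String × List String)) (out : List String),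
    pvStackM sgs st < fuel →
    pvLoop services sgs st out = out ++ st.flatMap (fun e => pvRaw services sgs e.1 e.2) := by
  intro fuel
  induction fuel with
  | zero => intro st out h; exact absurd h (Nat.not_lt_zero _)
  | succ f ih =>
    intro st out h
    match st with
    | [] => simp [pvLoop]
    | (n, s) :: st' =>
      rw [pvLoop, List.flatMap_cons, pvRaw]
      have hpop : pvStackM sgs st' < f := by
        have := pvStackM_pop sgs (n, s) st'
        omega
      by_cases hb : (PySem.Str.lower n) ∈ pvBroad
      · simp only [hb, if_true, if_pos]
        rw [ih st' (out ++ ["ALL"]) hpop]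
        simp
      · simp only [hb, if_false, if_neg, not_false_iff]
        by_cases hs : s.contains n
        · simp only [hs, dif_pos]
          rw [ih st' (out ++ [n]) hpop]
          simp
        · simp only [hs, Bool.false_eq_true, dif_neg, not_false_iff]
          cases hg : (PySem.Dict.mk sgs).get? n with
          | some group =>
            simp only [hg]
            have hpush : pvStackM sgs ((((PySem.Dict.mk group).getD "member" []).map
                (fun m => (m, PySem.Set.add s n))) ++ st') < f := by
              have := pvStackM_push sgs n s group st' hg (by simpa using hs)
              omega
            rw [ih _ out hpush]
            simp [Function.comp_def, List.flatMap_map]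
          | none =>
            simp only [hg]
            cases hsv : (PySem.Dict.mk services).get? n with
            | some service =>
              simp only [hsv]
              rw [ih st' (out ++ pvServiceTokens service n) hpop]
              simp
            | none =>
              simp only [hsv]
              rw [ih st' (out ++ [n]) hpop]
              simp

-- ===== VERDICT =====
theorem expand_service_py_spec : Claim_equal_expand_service_py := by
  intro name services service_groups seen _hdom
  unfold Spec_expand_service_py expand_service_py_alt
  rw [pvLoop_eq services service_groups (pvStackM service_groups [(name, seen)] + 1) _ _ (Nat.lt_succ_self _)]
  simp only [List.flatMap_cons, List.flatMap_nil, List.append_nil, List.nil_append]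
  exact pvA_eq services service_groups (pvMu service_groups seen + 1) seen (Nat.lt_succ_self _) name
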